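-- pv_equiv track=rewrite | github.com/rybinai/Some-labs-from-university | AlgorithmsAndDataStructures/3lab/s16.py | phone_to_words
-- ===== SOURCE A (Python) =====
-- def phone_to_words(phone, words):
--     digit_to_chars = {
--         '1': "ij", '2': "abc", '3': "def",
--         '4': "gh", '5': "kl", '6': "mn",
--         '7': "prs", '8': "tuv", '9': "wxy",
--         '0': "oqz"
--     }
--
--     word_to_digits = {}
--
--     for word in words:
--         key = ''.join([str([k for k, v in digit_to_chars.items() if letter in v][0]) for letter in word])
--         if key not in word_to_digits:
--             word_to_digits[key] = []
--         word_to_digits[key].append(word)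
--
--     n = len(phone)
--     dp = [float('inf')] * (n + 1)
--     previous = [-1] * (n + 1)
--
--     dp[0] = 0
--
--     for i in range(1, n + 1):
--         for j in range(i):
--             potential_word = phone[j:i]
--             if potential_word in word_to_digits and dp[j] + 1 < dp[i]:
--                 dp[i] = dp[j] + 1
--                 previous[i] = j
--
--     if dp[n] == float('inf'):
--         return "No solution."
--
--     result = []
--     current_index = n
--     while current_index > 0:
--         prev_index = previous[current_index]
--         for key in word_to_digits:
--             if prev_index == current_index - len(key) and key == phone[prev_index:current_index]:
--                 result.append(word_to_digits[key][0])
--                 break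
--         current_index = prev_index
--
--     result.reverse()
--     return ' '.join(result)
-- ===== SOURCE B (Python) =====
-- def phone_to_words(phone, words):
--     char_digit = {
--         'i': '1', 'j': '1', 'a': '2', 'b': '2', 'c': '2',
--         'd': '3', 'e': '3', 'f': '3', 'g': '4', 'h': '4',
--         'k': '5', 'l': '5', 'm': '6', 'n': '6',
--         'p': '7', 'r': '7', 's': '7', 't': '8', 'u': '8', 'v': '8',
--         'w': '9', 'x': '9', 'y': '9', 'o': '0', 'q': '0', 'z': '0'
--     }
--
--     # first word (in input order) for each digit key
--     first_word = {}
--     for word in words: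
--         first_word.setdefault(''.join(char_digit[c] for c in word), word)
--
--     # candidate segment lengths, longest first (so the DP probes one j per
--     # length, j ascending, matching the minimal split's tie-breaking)
--     lengths = sorted({len(w) for w in words if w}, reverse=True)
--
--     n = len(phone)
--     # best[i] = (word count, segmentation as a list of words) or None;
--     # the answer is read off best[n] directly -- no back-pointers, no
--     # reconstruction pass.
--     best = [(0, [])]
--     for i in range(1, n + 1):
--         b = None
--         for L in lengths:
--             if L <= i:
--                 prev = best[i - L]
--                 if prev is not None:
--                     if b is None or prev[0] + 1 < b[0]:
--                         w = first_word.get(phone[i - L:i])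
--                         if w is not None:
--                             b = (prev[0] + 1, prev[1] + [w])
--         best.append(b)
--
--     if best[n] is None:
--         return "No solution."
--     return ' '.join(best[n][1])
-- ===== Notes on version B (the rewrite author's own statement) =====
-- stated objective: faster
-- what changed: B keeps only the first word per digit-key and the sorted distinct word lengths, probes one j per candidate length instead of all j<i, and carries the segmentation itself inside each DP entry, so the back-pointer array and the reconstruction pass with its full key scan per word disappear.
import Mathlib
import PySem

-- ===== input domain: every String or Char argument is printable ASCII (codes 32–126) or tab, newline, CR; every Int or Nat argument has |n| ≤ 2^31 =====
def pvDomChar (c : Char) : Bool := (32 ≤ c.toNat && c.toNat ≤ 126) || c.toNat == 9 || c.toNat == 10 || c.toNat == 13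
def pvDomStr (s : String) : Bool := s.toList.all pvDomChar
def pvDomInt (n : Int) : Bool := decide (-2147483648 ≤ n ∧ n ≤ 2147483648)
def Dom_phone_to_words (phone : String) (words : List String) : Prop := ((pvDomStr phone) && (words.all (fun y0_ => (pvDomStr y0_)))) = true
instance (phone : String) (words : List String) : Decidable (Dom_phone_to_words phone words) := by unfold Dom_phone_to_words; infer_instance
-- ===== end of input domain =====

-- B replaces A's O(n^2)-subslice DP (with a letter scan per char and a full key scan
-- per reconstructed word) by a DP over the distinct word lengths whose entries carry
-- the segmentation itself, so A's back-pointer array and reconstruction pass vanish.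

-- ===== PORT A =====
-- Strings are handled as List Char (String.toList is injective, so dict keys and
-- '==' comparisons on them are exact); 'letter in v' for a single char is membership.
def pvA_d2c : List (Char × List Char) :=
  [('1', ['i','j']), ('2', ['a','b','c']), ('3', ['d','e','f']),
   ('4', ['g','h']), ('5', ['k','l']), ('6', ['m','n']),
   ('7', ['p','r','s']), ('8', ['t','u','v']), ('9', ['w','x','y']),
   ('0', ['o','q','z'])]

-- [k for k, v in digit_to_chars.items() if letter in v][0]; the '?' default marks the
-- IndexError Python raises on a letter outside a-z (excluded by Pre_).
def pvA_digitOf (c : Char) : Char :=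
  ((pvA_d2c.filter (fun kv => kv.2.contains c)).map (fun kv => kv.1)).headD '?'

-- ''.join(... for letter in word): one digit per letter
def pvA_key (w : String) : List Char := w.toList.map pvA_digitOf

def pvA_dict (words : List String) : PySem.Dict (List Char) (List String) :=
  words.foldl (fun d w => d.modify (pvA_key w) [] (fun l => l ++ [w])) PySem.Dict.empty

-- comparison against float('inf') (none); only the cases Python's dp values reach
def pvA_lt : Option Int → Option Int → Bool
  | some a, some b => a < b
  | some _, none => true
  | none, _ => false

-- while current_index > 0 … ; fuel n+1 bounds the iterations (previous[] strictly decreases)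
def pvA_rec (wd : PySem.Dict (List Char) (List String)) (p : List Char) (prevs : List Int) :
    Nat → Int → List String → List String
  | 0, _, acc => acc
  | fuel + 1, cur, acc =>
    if 0 < cur then
      let pj := PySem.List.pyGetD prevs cur (-1)
      let acc' :=
        match wd.keys.find? (fun k =>
            pj == cur - (k.length : Int) && k == PySem.List.slice p (some pj) (some cur)) with
        | some k => acc ++ [(wd.getD k []).headD ""]   -- [0]; "" marks the unreachable IndexError
        | none => acc
      pvA_rec wd p prevs fuel pj acc'
    else acc

-- the body of the inner 'for j in range(i)' loop
def pvA_inner (wd : PySem.Dict (List Char) (List String)) (p : List Char) (i : Nat)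
    (st : List (Option Int) × List Int) (j : Nat) : List (Option Int) × List Int :=
  let pw := PySem.List.slice p (some (j : Int)) (some (i : Int))
  if wd.contains pw && pvA_lt ((st.1.getD j none).map (· + 1)) (st.1.getD i none)
  then (st.1.set i ((st.1.getD j none).map (· + 1)), st.2.set i (j : Int))
  else st

-- the body of the outer 'for i in range(1, n + 1)' loop
def pvA_outer (wd : PySem.Dict (List Char) (List String)) (p : List Char)
    (st : List (Option Int) × List Int) (i0 : Nat) : List (Option Int) × List Int :=
  (List.range (i0 + 1)).foldl (pvA_inner wd p (i0 + 1)) st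

def phone_to_words (phone : String) (words : List String) : String :=
  let p := phone.toList
  let wd := pvA_dict words
  let n := p.length
  let dp0 : List (Option Int) := (List.replicate (n + 1) none).set 0 (some 0)
  let prev0 : List Int := List.replicate (n + 1) (-1)
  let st := (List.range n).foldl (pvA_outer wd p) (dp0, prev0)
  if st.1.getD n none = none then "No solution."
  else PySem.Str.join " " (pvA_rec wd p st.2 (n + 1) (n : Int) []).reverse

-- ===== PORT B =====
def pvB_cd : PySem.Dict Char Char := PySem.Dict.mk
  [('i','1'),('j','1'),('a','2'),('b','2'),('c','2'),('d','3'),('e','3'),('f','3'),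
   ('g','4'),('h','4'),('k','5'),('l','5'),('m','6'),('n','6'),('p','7'),('r','7'),
   ('s','7'),('t','8'),('u','8'),('v','8'),('w','9'),('x','9'),('y','9'),
   ('o','0'),('q','0'),('z','0')]

-- char_digit[c]; the '?' default marks the KeyError Python raises outside a-z (excluded by Pre_)
def pvB_key (w : String) : List Char := w.toList.map (fun c => pvB_cd.getD c '?')

-- first_word.setdefault(key, word)
def pvB_first (words : List String) : PySem.Dict (List Char) String :=
  words.foldl (fun d w =>
    let k := pvB_key w
    if d.contains k then d else d.insert k w) PySem.Dict.empty

-- sorted({len(w) for w in words if w}, reverse=True)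
def pvB_lens (words : List String) : List Nat :=
  PySem.List.sorted
    (PySem.Set.ofList ((words.filter (fun w => !w.toList.isEmpty)).map (fun w => w.toList.length)))
    (fun x => x) true

-- the body of the inner 'for L in lengths' loop: b is the running candidate
-- (count, segmentation) for position i, read off the already-final entries of best
def pvB_inner (fw : PySem.Dict (List Char) String) (p : List Char)
    (best : List (Option (Int × List String))) (i : Nat)
    (b : Option (Int × List String)) (L : Nat) : Option (Int × List String) :=
  if L ≤ i then
    match best.getD (i - L) none with
    | none => b
    | some pr =>
      if b.all (fun bb => decide (pr.1 + 1 < bb.1)) then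
        match fw.get? (PySem.List.slice p (some ((i - L : Nat) : Int)) (some (i : Int))) with
        | some w => some (pr.1 + 1, pr.2 ++ [w])
        | none => b
      else b
  else b

-- one outer step: best.append(b)
def pvB_outer (fw : PySem.Dict (List Char) String) (lens : List Nat) (p : List Char)
    (best : List (Option (Int × List String))) (i0 : Nat) :
    List (Option (Int × List String)) :=
  best ++ [lens.foldl (pvB_inner fw p best (i0 + 1)) none]

def phone_to_words_alt (phone : String) (words : List String) : String :=
  let p := phone.toList
  let fw := pvB_first words
  let lens := pvB_lens words
  let n := p.length
  let best := (List.range n).foldl (pvB_outer fw lens p) [some (0, [])]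
  match best.getD n none with
  | none => "No solution."
  | some pr => PySem.Str.join " " pr.2

-- ===== PRECONDITION & SPEC =====
-- Pre_ excludes exactly the inputs where A raises: a word with a character outside
-- 'a'..'z' has no digit (IndexError in A; KeyError in B).
def Pre_phone_to_words (phone : String) (words : List String) : Prop :=
  (words.all (fun w => w.toList.all (fun c => 'a' ≤ c && c ≤ 'z'))) = true
instance (phone : String) (words : List String) : Decidable (Pre_phone_to_words phone words) := by
  unfold Pre_phone_to_words; infer_instance

def pvWitness_phone_to_words : String × List String := ("27", ["ap", "a", "p"])

def Spec_phone_to_words (phone : String) (words : List String) (out : String) : Prop :=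
  out = phone_to_words_alt phone words
instance (phone : String) (words : List String) (out : String) :
    Decidable (Spec_phone_to_words phone words out) := by unfold Spec_phone_to_words; infer_instance

-- ===== CLAIM (what is proved, stated in full; the proofs are below) =====
def Claim_equal_phone_to_words : Prop :=
  ∀ (phone : String) (words : List String), Dom_phone_to_words phone words →
    Pre_phone_to_words phone words →
    Spec_phone_to_words phone words (phone_to_words phone words)

-- ===== LEMMAS AND PROOFS =====

theorem pv_digit_eq (c : Char) : pvA_digitOf c = pvB_cd.getD c '?' := by
  rcases Decidable.em (c ∈ ['i','j','a','b','c','d','e','f','g','h','k','l','m','n','p','r','s','t','u','v','w','x','y','o','q','z']) with hm|hm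
  · have hall : (['i','j','a','b','c','d','e','f','g','h','k','l','m','n','p','r','s','t','u','v','w','x','y','o','q','z'].all
        (fun c => pvA_digitOf c == pvB_cd.getD c '?')) = true := by decide
    rw [List.all_eq_true] at hall
    exact beq_iff_eq.mp (hall c hm)
  · simp only [List.mem_cons, List.not_mem_nil, or_false, not_or] at hm
    obtain ⟨h1,h2,h3,h4,h5,h6,h7,h8,h9,h10,h11,h12,h13,h14,h15,h16,h17,h18,h19,h20,h21,h22,h23,h24,h25,h26⟩ := hm
    have hB : pvB_cd.get? c = none := by
      rw [PySem.Dict.get?_eq_none_iff_not_mem_keys]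
      simp [pvB_cd, PySem.Dict.keys_mk]
      tauto
    have hA : List.find? (fun kv => decide (c ∈ kv.2)) pvA_d2c = none := by
      rw [List.find?_eq_none]
      intro kv hkv
      fin_cases hkv <;> simp <;> tauto
    simp [pvA_digitOf, PySem.Dict.getD_eq_get?_getD, hB, hA]

theorem pv_key_eq (w : String) : pvA_key w = pvB_key w :=
  List.map_congr_left (fun c _ => pv_digit_eq c)

theorem pvA_dict_getD (ws : List String) (k : List Char) :
    (pvA_dict ws).getD k [] = ws.filter (fun w => pvA_key w == k) := by
  have h : pvA_dict ws
      = ((ws.map (fun w => (pvA_key w, w))).foldl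
          (fun d p => d.modify p.1 [] (fun l => l ++ [p.2])) PySem.Dict.empty) := by
    rw [List.foldl_map]; rfl
  rw [h, PySem.Dict.getD_foldl_modify_append, List.filter_map, List.map_map]
  simp [Function.comp_def]

theorem pvA_dict_contains_aux (ws : List String) (k : List Char)
    (d : PySem.Dict (List Char) (List String)) :
    ((ws.foldl (fun d w => d.modify (pvA_key w) [] (fun l => l ++ [w])) d).contains k)
      = (d.contains k || ws.any (fun w => pvA_key w == k)) := by
  induction ws generalizing d with
  | nil => simp
  | cons w t ih =>
    simp only [List.foldl_cons, ih, PySem.Dict.contains_modify, List.any_cons]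
    by_cases hw : k = pvA_key w
    · simp [hw, Bool.or_comm]
    · have h1 : (k == pvA_key w) = false := by simpa using hw
      have h2 : (pvA_key w == k) = false := by simpa using Ne.symm hw
      simp [h1, h2]

theorem pvA_dict_contains (ws : List String) (k : List Char) :
    (pvA_dict ws).contains k = ws.any (fun w => pvA_key w == k) := by
  rw [pvA_dict, pvA_dict_contains_aux]; simp

theorem pvB_first_get?_aux (ws : List String) (k : List Char)
    (f : PySem.Dict (List Char) String) :
    ((ws.foldl (fun d w => let kk := pvB_key w; if d.contains kk then d else d.insert kk w) f).get? k)
      = (f.get? k).or ((ws.filter (fun w => pvB_key w == k)).head?) := by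
  induction ws generalizing f with
  | nil => simp
  | cons w t ih =>
    simp only [List.foldl_cons]
    by_cases hw : pvB_key w = k
    · subst hw
      by_cases hc : f.contains (pvB_key w)
      · have hsome : (f.get? (pvB_key w)).isSome := by
          rw [← PySem.Dict.contains_eq_isSome_get?]; exact hc
        rcases Option.isSome_iff_exists.mp hsome with ⟨v, hv⟩
        rw [if_pos hc, ih f, List.filter_cons_of_pos (by simp), hv]
        simp
      · have hn : f.get? (pvB_key w) = none := by
          rw [PySem.Dict.get?_eq_none_iff_not_mem_keys]
          exact fun hmem => hc ((PySem.Dict.contains_iff_mem_keys _ _).mpr hmem)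
        rw [if_neg hc, ih, List.filter_cons_of_pos (by simp), hn]
        simp
    · have hb : (pvB_key w == k) = false := by simpa using hw
      have hw' : ¬ k = pvB_key w := Ne.symm hw
      rw [List.filter_cons_of_neg (by simp [hb])]
      by_cases hc : f.contains (pvB_key w)
      · rw [if_pos hc, ih]
      · rw [if_neg hc, ih]
        have hins : (f.insert (pvB_key w) w).get? k = f.get? k := by
          rw [PySem.Dict.get?_insert]; simp [hw']
        rw [hins]

theorem pvB_first_get? (ws : List String) (k : List Char) :
    (pvB_first ws).get? k = (ws.filter (fun w => pvB_key w == k)).head? := by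
  rw [pvB_first, pvB_first_get?_aux]; simp

-- B's dict lookup, phrased with A's key function
theorem pv_get_first (ws : List String) (s : List Char) :
    (pvB_first ws).get? s = (ws.filter (fun w => pvA_key w == s)).head? := by
  rw [pvB_first_get?]
  congr 1
  exact List.filter_congr (fun x _ => by rw [pv_key_eq x])

-- A's membership test, phrased through the same filter
theorem pv_contains_head (ws : List String) (s : List Char) :
    (pvA_dict ws).contains s = ((ws.filter (fun w => pvA_key w == s)).head?).isSome := by
  rw [pvA_dict_contains]
  rcases hf : (ws.filter (fun w => pvA_key w == s)) with _ | ⟨w, t⟩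
  · have hnil := List.filter_eq_nil_iff.mp hf
    simp only [List.head?_nil, Option.isSome_none]
    rw [List.any_eq_false]
    intro x hx
    simpa using hnil x hx
  · have hmem : w ∈ ws.filter (fun w => pvA_key w == s) := by rw [hf]; exact List.mem_cons_self ..
    simp only [List.head?_cons, Option.isSome_some]
    rw [List.any_eq_true]
    exact ⟨w, List.mem_of_mem_filter hmem, by simpa using (List.mem_filter.mp hmem).2⟩

theorem pv_lens_mem (ws : List String) (m : Nat) :
    m ∈ pvB_lens ws ↔ ∃ w ∈ ws, w.toList ≠ [] ∧ w.toList.length = m := by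
  rw [pvB_lens, PySem.List.mem_sorted, PySem.Set.mem_ofList]
  simp [List.mem_filter]
  constructor
  · rintro ⟨w, ⟨hw, hne⟩, hm⟩; exact ⟨w, hw, by simpa using hne, hm⟩
  · rintro ⟨w, hw, hne, hm⟩; exact ⟨w, ⟨hw, by simpa using hne⟩, hm⟩

theorem pv_lens_pairwise (ws : List String) : (pvB_lens ws).Pairwise (· > ·) := by
  have h1 := PySem.List.sorted_pairwise_rev
    (PySem.Set.ofList ((ws.filter (fun w => !w.toList.isEmpty)).map (fun w => w.toList.length)))
    (fun x => x)
  have h2 : (pvB_lens ws).Nodup :=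
    ((PySem.List.sorted_perm _ _ _).nodup_iff).mpr (PySem.Set.nodup_ofList _)
  exact (h1.and h2).imp (fun h => lt_of_le_of_ne h.1 (Ne.symm h.2))

theorem pv_foldl_rel {α β γ : Type} (R : α → β → Prop) (f : α → γ → α) (g : β → γ → β)
    (l : List γ) (sa : α) (sb : β) (h0 : R sa sb)
    (hstep : ∀ sa sb x, x ∈ l → R sa sb → R (f sa x) (g sb x)) :
    R (l.foldl f sa) (l.foldl g sb) := by
  induction l generalizing sa sb with
  | nil => exact h0
  | cons x t ih =>
    exact ih _ _ (hstep _ _ _ (List.mem_cons_self ..) h0)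
      (fun sa sb y hy => hstep _ _ _ (List.mem_cons_of_mem _ hy))

theorem pv_foldl_skip {α γ : Type} (f : α → γ → α) (p : γ → Bool) (l : List γ) (s : α)
    (h : ∀ s x, x ∈ l → p x = false → f s x = s) :
    l.foldl f s = (l.filter p).foldl f s := by
  induction l generalizing s with
  | nil => rfl
  | cons x t ih =>
    rcases hp : p x with _ | _
    · rw [List.foldl_cons, h s x (List.mem_cons_self ..) hp, List.filter_cons_of_neg (by simp [hp])]
      exact ih _ (fun s y hy => h s y (List.mem_cons_of_mem _ hy))
    · rw [List.foldl_cons, List.filter_cons_of_pos hp, List.foldl_cons]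
      exact ih _ (fun s y hy => h s y (List.mem_cons_of_mem _ hy))

theorem pv_range_filter (l : List Nat) (hs : l.Pairwise (· < ·)) :
    ∀ (i : Nat), (∀ x ∈ l, x < i) →
    (List.range i).filter (fun j => l.contains j) = l := by
  induction l using List.reverseRecOn with
  | nil => intro i _; simp
  | append_singleton l' x ih =>
    intro i hlt
    have hp := List.pairwise_append.mp hs
    have hlx : ∀ y ∈ l', y < x := fun y hy => hp.2.2 y hy x (List.mem_singleton_self x)
    have hxi : x < i := hlt x (by simp)
    obtain ⟨m, hm⟩ : ∃ m, i = (x + 1) + m := ⟨i - (x + 1), by omega⟩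
    subst hm
    rw [List.range_add, List.filter_append, List.range_succ, List.filter_append]
    have e1 : (List.range x).filter (fun j => (l' ++ [x]).contains j)
        = (List.range x).filter (fun j => l'.contains j) := by
      refine List.filter_congr (fun j hj => ?_)
      rw [List.mem_range] at hj
      simp [List.contains_eq_mem, Nat.ne_of_lt hj]
    have e2 : ([x].filter (fun j => (l' ++ [x]).contains j)) = [x] := by simp
    have e3 : ((List.range m).map (fun k => x + 1 + k)).filter (fun j => (l' ++ [x]).contains j) = [] := by
      rw [List.filter_eq_nil_iff]
      intro a ha
      rcases List.mem_map.mp ha with ⟨k, _, rfl⟩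
      simp only [List.contains_eq_mem, List.mem_append, List.mem_singleton]
      rw [decide_eq_true_eq]
      intro hor
      rcases hor with hmem | heq
      · exact absurd (hlx _ hmem) (by omega)
      · omega
    rw [e1, e2, e3, ih hp.1 x hlx, List.append_nil]

theorem pv_slice_len (p : List Char) (j i : Nat) (hj : j ≤ i) (hi : i ≤ p.length) :
    (PySem.List.slice p (some (j : Int)) (some (i : Int))).length = i - j := by
  rw [PySem.List.slice_natCast, List.length_take, List.length_drop]
  omega

theorem pv_contains_len (ws : List String) (p : List Char) (j i : Nat) (hj : j < i)
    (hi : i ≤ p.length)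
    (hc : (pvA_dict ws).contains (PySem.List.slice p (some (j : Int)) (some (i : Int))) = true) :
    (i - j) ∈ pvB_lens ws := by
  rw [pvA_dict_contains, List.any_eq_true] at hc
  rcases hc with ⟨w, hw, hk⟩
  have hkey : pvA_key w = PySem.List.slice p (some (j : Int)) (some (i : Int)) := by simpa using hk
  have hlen : w.toList.length = i - j := by
    have := congrArg List.length hkey
    rwa [pvA_key, List.length_map, pv_slice_len p j i (le_of_lt hj) hi] at this
  rw [pv_lens_mem]
  exact ⟨w, hw, by intro hnil; rw [hnil] at hlen; simp at hlen; omega, hlen⟩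

theorem pv_find_unique {α : Type} (l : List α) (pred : α → Bool) (x : α) (hx : x ∈ l)
    (hpx : pred x = true) (hu : ∀ y ∈ l, pred y = true → y = x) : l.find? pred = some x := by
  induction l with
  | nil => cases hx
  | cons a t ih =>
    rcases hpa : pred a with _ | _
    · rw [List.find?_cons_of_neg (by simp [hpa])]
      rcases List.mem_cons.mp hx with rfl | hxt
      · rw [hpa] at hpx; cases hpx
      · exact ih hxt (fun y hy => hu y (List.mem_cons_of_mem _ hy))
    · rw [List.find?_cons_of_pos hpa, hu a (List.mem_cons_self ..) hpa]

theorem pv_getD_set_ne {α : Type} (l : List α) (x d : α) (i k : Nat) (h : k ≠ i) :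
    (l.set i x).getD k d = l.getD k d := by
  rw [List.getD_eq_getElem?_getD, List.getElem?_set_ne (fun he => h he.symm),
    List.getD_eq_getElem?_getD]

theorem pv_getD_set_self {α : Type} (l : List α) (x d : α) (i : Nat) (h : i < l.length) :
    (l.set i x).getD i d = x := by
  rw [List.getD_eq_getElem?_getD, List.getElem?_set_self h]; rfl

theorem pv_getD_append_lt {α : Type} (l : List α) (x d : α) (k : Nat) (hk : k < l.length) :
    (l ++ [x]).getD k d = l.getD k d := by
  rw [List.getD_eq_getElem?_getD, List.getElem?_append_left hk, List.getD_eq_getElem?_getD]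

theorem pv_getD_append_eq {α : Type} (l : List α) (x d : α) :
    (l ++ [x]).getD l.length d = x := by
  rw [List.getD_eq_getElem?_getD]
  simp

-- the correspondence of one finished DP entry: A's (dp, previous) data and B's
-- (count, segmentation) entry describe the same parent choice
def pvEntry (p : List Char) (words : List String) (dp : List (Option Int)) (pr : List Int)
    (best : List (Option (Int × List String))) (k : Nat) : Prop :=
  (dp.getD k none = none ∧ pr.getD k (-1) = -1 ∧ best.getD k none = none) ∨
  (∃ j v seg w, j < k ∧ pr.getD k (-1) = (j : Int) ∧ dp.getD k none = some (v + 1) ∧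
    dp.getD j none = some v ∧
    (pvA_dict words).contains (PySem.List.slice p (some (j : Int)) (some (k : Int))) = true ∧
    (words.filter (fun x => pvA_key x == PySem.List.slice p (some (j : Int)) (some (k : Int)))).head? = some w ∧
    best.getD j none = some (v, seg) ∧ best.getD k none = some (v + 1, seg ++ [w]))

-- the outer-loop invariant after m iterations
def pvRel (p : List Char) (words : List String) (m : Nat)
    (sa : List (Option Int) × List Int) (best : List (Option (Int × List String))) : Prop :=
  sa.1.length = p.length + 1 ∧ sa.2.length = p.length + 1 ∧ best.length = m + 1 ∧
  sa.1.getD 0 none = some 0 ∧ best.getD 0 none = some (0, []) ∧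
  (∀ k, 1 ≤ k → k ≤ m → pvEntry p words sa.1 sa.2 best k) ∧
  (∀ k, m < k → k ≤ p.length → sa.1.getD k none = none ∧ sa.2.getD k (-1) = -1)

-- the inner-loop invariant at outer index i: A's state differs from the pre-loop
-- state only at i, and B's running candidate b mirrors that entry
def pvIRel (p : List Char) (words : List String) (i : Nat)
    (sa0 : List (Option Int) × List Int) (best0 : List (Option (Int × List String)))
    (st : List (Option Int) × List Int) (b : Option (Int × List String)) : Prop :=
  st.1.length = sa0.1.length ∧ st.2.length = sa0.2.length ∧
  (∀ k, k ≠ i → st.1.getD k none = sa0.1.getD k none) ∧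
  (∀ k, k ≠ i → st.2.getD k (-1) = sa0.2.getD k (-1)) ∧
  ((st.1.getD i none = none ∧ st.2.getD i (-1) = -1 ∧ b = none) ∨
   (∃ j v seg w, j < i ∧ st.2.getD i (-1) = (j : Int) ∧ st.1.getD i none = some (v + 1) ∧
     sa0.1.getD j none = some v ∧
     (pvA_dict words).contains (PySem.List.slice p (some (j : Int)) (some (i : Int))) = true ∧
     (words.filter (fun x => pvA_key x == PySem.List.slice p (some (j : Int)) (some (i : Int)))).head? = some w ∧
     best0.getD j none = some (v, seg) ∧ b = some (v + 1, seg ++ [w])))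

-- B's inner body as a function of the probed start index j = i - L
def pvB_body (fw : PySem.Dict (List Char) String) (p : List Char)
    (best0 : List (Option (Int × List String))) (i : Nat)
    (b : Option (Int × List String)) (j : Nat) : Option (Int × List String) :=
  match best0.getD j none with
  | none => b
  | some pr =>
    if b.all (fun bb => decide (pr.1 + 1 < bb.1)) then
      match fw.get? (PySem.List.slice p (some (j : Int)) (some (i : Int))) with
      | some w => some (pr.1 + 1, pr.2 ++ [w])
      | none => b
    else b

theorem pv_counts {p : List Char} {words : List String} {m : Nat}
    {sa : List (Option Int) × List Int} {best : List (Option (Int × List String))}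
    (h : pvRel p words m sa best) (k : Nat) (hk : k ≤ m) :
    (sa.1.getD k none = none ∧ best.getD k none = none) ∨
    ∃ v seg, sa.1.getD k none = some v ∧ best.getD k none = some (v, seg) := by
  rcases Nat.eq_zero_or_pos k with rfl | hk1
  · exact Or.inr ⟨0, [], h.2.2.2.1, h.2.2.2.2.1⟩
  · rcases h.2.2.2.2.2.1 k hk1 hk with ⟨h1, _, h3⟩ | ⟨j, v, seg, w, _, _, hdp, _, _, _, _, hb⟩
    · exact Or.inl ⟨h1, h3⟩
    · exact Or.inr ⟨v + 1, seg ++ [w], hdp, hb⟩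

theorem pv_step (words : List String) (p : List Char) (i j : Nat) (hj : j < i)
    (hi : i ≤ p.length) (sa0 : List (Option Int) × List Int)
    (best0 : List (Option (Int × List String)))
    (hrel : pvRel p words (i - 1) sa0 best0)
    (st : List (Option Int) × List Int) (b : Option (Int × List String))
    (h : pvIRel p words i sa0 best0 st b) :
    pvIRel p words i sa0 best0 (pvA_inner (pvA_dict words) p i st j)
      (pvB_body (pvB_first words) p best0 i b j) := by
  obtain ⟨hl1, hl2, he1, he2, hcase⟩ := h
  have hstj : st.1.getD j none = sa0.1.getD j none := he1 j (by omega)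
  have hilt1 : i < st.1.length := by rw [hl1, hrel.1]; omega
  have hilt2 : i < st.2.length := by rw [hl2, hrel.2.1]; omega
  rcases pv_counts hrel j (by omega) with ⟨hjn, hbn⟩ | ⟨v, seg, hjv, hbv⟩
  · -- dp[j] = inf / best[j] = None: both sides are no-ops
    have hA : pvA_inner (pvA_dict words) p i st j = st := by
      have hmap : (st.1.getD j none).map (· + 1) = none := by rw [hstj, hjn]; rfl
      rw [pvA_inner]
      simp only [hmap]
      cases st.1.getD i none <;> simp [pvA_lt]
    have hB : pvB_body (pvB_first words) p best0 i b j = b := by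
      rw [pvB_body, hbn]
    rw [hA, hB]
    exact ⟨hl1, hl2, he1, he2, hcase⟩
  · have hmap : (st.1.getD j none).map (· + 1) = some (v + 1) := by rw [hstj, hjv]; rfl
    have hBm : pvB_body (pvB_first words) p best0 i b j
        = (if b.all (fun bb => decide (v + 1 < bb.1)) then
            match (pvB_first words).get? (PySem.List.slice p (some (j : Int)) (some (i : Int))) with
            | some w => some (v + 1, seg ++ [w])
            | none => b
          else b) := by
      rw [pvB_body, hbv]
    -- establish: count-test equal on both sides
    have hcnt : pvA_lt (some (v + 1)) (st.1.getD i none)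
        = b.all (fun bb => decide (v + 1 < bb.1)) := by
      rcases hcase with ⟨hiN, _, rfl⟩ | ⟨j', v', seg', w', _, _, hdi, _, _, _, _, rfl⟩
      · rw [hiN]; rfl
      · rw [hdi]; simp [pvA_lt]
    rcases hb2 : b.all (fun bb => decide (v + 1 < bb.1)) with _ | _
    · -- count test fails: both no-ops
      have hA : pvA_inner (pvA_dict words) p i st j = st := by
        rw [pvA_inner]
        simp only [hmap, hcnt, hb2, Bool.and_false, Bool.false_eq_true, if_false]
      rw [hA, hBm, if_neg (by simp [hb2])]
      exact ⟨hl1, hl2, he1, he2, hcase⟩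
    · -- count test passes: decided by membership
      rcases hhd : (words.filter (fun x => pvA_key x
          == PySem.List.slice p (some (j : Int)) (some (i : Int)))).head? with _ | ⟨w⟩
      · -- not a key: both no-ops
        have hcf : (pvA_dict words).contains
            (PySem.List.slice p (some (j : Int)) (some (i : Int))) = false := by
          rw [pv_contains_head, hhd]; rfl
        have hgf : (pvB_first words).get?
            (PySem.List.slice p (some (j : Int)) (some (i : Int))) = none := by
          rw [pv_get_first, hhd]
        have hA : pvA_inner (pvA_dict words) p i st j = st := by
          rw [pvA_inner]
          simp only [hcf, Bool.false_and, Bool.false_eq_true, if_false]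
        rw [hA, hBm, if_pos (by simp [hb2]), hgf]
        exact ⟨hl1, hl2, he1, he2, hcase⟩
      · -- a key: both update to parent j
        have hct : (pvA_dict words).contains
            (PySem.List.slice p (some (j : Int)) (some (i : Int))) = true := by
          rw [pv_contains_head, hhd]; rfl
        have hgs : (pvB_first words).get?
            (PySem.List.slice p (some (j : Int)) (some (i : Int))) = some w := by
          rw [pv_get_first, hhd]
        have hA : pvA_inner (pvA_dict words) p i st j
            = (st.1.set i (some (v + 1)), st.2.set i (j : Int)) := by
          rw [pvA_inner]
          simp only [hmap, hcnt, hb2, hct, Bool.true_and, if_true]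
        rw [hA, hBm, if_pos (by simp [hb2]), hgs]
        refine ⟨by simpa using hl1, by simpa using hl2, ?_, ?_,
          Or.inr ⟨j, v, seg, w, hj, ?_, ?_, hjv, hct, hhd, hbv, rfl⟩⟩
        · intro k hk
          rw [show ((st.1.set i (some (v + 1)), st.2.set i (j : Int)) :
              List (Option Int) × List Int).1 = st.1.set i (some (v + 1)) from rfl,
            pv_getD_set_ne _ _ _ _ _ hk]
          exact he1 k hk
        · intro k hk
          rw [show ((st.1.set i (some (v + 1)), st.2.set i (j : Int)) :
              List (Option Int) × List Int).2 = st.2.set i (j : Int) from rfl,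
            pv_getD_set_ne _ _ _ _ _ hk]
          exact he2 k hk
        · exact pv_getD_set_self _ _ _ _ hilt2
        · exact pv_getD_set_self _ _ _ _ hilt1

theorem pv_inner_loop (words : List String) (p : List Char) (i : Nat) (hi1 : 1 ≤ i)
    (hin : i ≤ p.length) (sa0 : List (Option Int) × List Int)
    (best0 : List (Option (Int × List String)))
    (hrel : pvRel p words (i - 1) sa0 best0) :
    pvIRel p words i sa0 best0
      ((List.range i).foldl (pvA_inner (pvA_dict words) p i) sa0)
      ((pvB_lens words).foldl (pvB_inner (pvB_first words) p best0 i) none) := by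
  set X := ((pvB_lens words).filter (fun L => decide (L ≤ i))).map (fun L => i - L) with hX
  have hmem1 : ∀ L ∈ pvB_lens words, 1 ≤ L := by
    intro L hL
    rcases (pv_lens_mem words L).mp hL with ⟨w, _, hne, hlen⟩
    have := List.length_pos_of_ne_nil hne
    omega
  have hXmem : ∀ x ∈ X, x < i := by
    intro x hx
    rcases List.mem_map.mp hx with ⟨L, hL, rfl⟩
    have h1 := hmem1 L (List.mem_filter.mp hL).1
    have h2 : L ≤ i := by simpa using (List.mem_filter.mp hL).2
    omega
  have hXpair : X.Pairwise (· < ·) := by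
    have hfp : ((pvB_lens words).filter (fun L => decide (L ≤ i))).Pairwise (· > ·) :=
      (pv_lens_pairwise words).filter _
    refine List.pairwise_map.mpr (List.Pairwise.imp_of_mem ?_ hfp)
    intro a b hma hmb hab
    have ha' : a ≤ i := by simpa using (List.mem_filter.mp hma).2
    have hb1 : 1 ≤ b := hmem1 b (List.mem_filter.mp hmb).1
    omega
  have hskip : ∀ (s : List (Option Int) × List Int) (jx : Nat), jx ∈ List.range i →
      X.contains jx = false → pvA_inner (pvA_dict words) p i s jx = s := by
    intro s jx hjx hnc
    have hjxi : jx < i := List.mem_range.mp hjx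
    have hcf : (pvA_dict words).contains
        (PySem.List.slice p (some (jx : Int)) (some (i : Int))) = false := by
      rcases hcc : (pvA_dict words).contains
          (PySem.List.slice p (some (jx : Int)) (some (i : Int))) with _ | _
      · rfl
      · exfalso
        have hlm := pv_contains_len words p jx i hjxi hin hcc
        have : jx ∈ X := by
          rw [hX]
          refine List.mem_map.mpr ⟨i - jx, List.mem_filter.mpr ⟨hlm, by simp⟩, by omega⟩
        rw [List.contains_eq_mem] at hnc
        simp [this] at hnc
    rw [pvA_inner]
    simp [hcf]
  have hskipB : ∀ (b : Option (Int × List String)) (L : Nat), L ∈ pvB_lens words →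
      (decide (L ≤ i)) = false → pvB_inner (pvB_first words) p best0 i b L = b := by
    intro b L _ hd
    have hgt : ¬ L ≤ i := by simpa using hd
    simp [pvB_inner, hgt]
  have hcongr : ((pvB_lens words).filter (fun L => decide (L ≤ i))).foldl
        (pvB_inner (pvB_first words) p best0 i) none
      = ((pvB_lens words).filter (fun L => decide (L ≤ i))).foldl
        (fun b L => pvB_body (pvB_first words) p best0 i b (i - L)) none := by
    refine PySem.List.foldl_congr_mem _ _ _ _ ?_
    intro acc L hL
    have hLi : L ≤ i := by simpa using (List.mem_filter.mp hL).2
    rw [pvB_inner, if_pos hLi]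
    rfl
  have hinit : pvIRel p words i sa0 best0 sa0 none := by
    refine ⟨rfl, rfl, fun _ _ => rfl, fun _ _ => rfl, Or.inl ⟨?_, ?_, rfl⟩⟩
    · exact (hrel.2.2.2.2.2.2 i (by omega) hin).1
    · exact (hrel.2.2.2.2.2.2 i (by omega) hin).2
  have hrelX := pv_foldl_rel (pvIRel p words i sa0 best0) _ _ X sa0 none hinit
    (fun sa sb x hx hr => pv_step words p i x (hXmem x hx) hin sa0 best0 hrel sa sb hr)
  have hAeq : (List.range i).foldl (pvA_inner (pvA_dict words) p i) sa0
      = X.foldl (pvA_inner (pvA_dict words) p i) sa0 := by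
    rw [pv_foldl_skip _ (fun j => X.contains j) _ _ hskip, pv_range_filter X hXpair i hXmem]
  have hBeq : (pvB_lens words).foldl (pvB_inner (pvB_first words) p best0 i) none
      = X.foldl (pvB_body (pvB_first words) p best0 i) none := by
    rw [pv_foldl_skip _ (fun L => decide (L ≤ i)) _ _ hskipB, hcongr]
    exact (List.foldl_map).symm
  rw [hAeq, hBeq]
  exact hrelX

theorem pv_outer_step (words : List String) (p : List Char) (i : Nat) (hi1 : 1 ≤ i)
    (hi : i ≤ p.length) (sa0 : List (Option Int) × List Int)
    (best0 : List (Option (Int × List String)))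
    (hrel : pvRel p words (i - 1) sa0 best0)
    (st : List (Option Int) × List Int) (b : Option (Int × List String))
    (h : pvIRel p words i sa0 best0 st b) :
    pvRel p words i st (best0 ++ [b]) := by
  obtain ⟨hl1, hl2, he1, he2, hcase⟩ := h
  have hb0len : best0.length = i := by
    have := hrel.2.2.1; omega
  refine ⟨by rw [hl1, hrel.1], by rw [hl2, hrel.2.1], by simp [hb0len], ?_, ?_, ?_, ?_⟩
  · rw [he1 0 (by omega)]; exact hrel.2.2.2.1
  · rw [pv_getD_append_lt _ _ _ _ (by omega)]; exact hrel.2.2.2.2.1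
  · intro k hk1 hki
    rcases Nat.lt_or_ge k i with hki' | hki'
    · -- an older entry: unchanged on both sides
      rcases hrel.2.2.2.2.2.1 k hk1 (by omega) with ⟨e1, e2, e3⟩ | ⟨j, v, seg, w, hjk, f1, f2, f3, f4, f5, f6, f7⟩
      · exact Or.inl ⟨by rw [he1 k (by omega)]; exact e1, by rw [he2 k (by omega)]; exact e2,
          by rw [pv_getD_append_lt _ _ _ _ (by omega)]; exact e3⟩
      · exact Or.inr ⟨j, v, seg, w, hjk, by rw [he2 k (by omega)]; exact f1,
          by rw [he1 k (by omega)]; exact f2, by rw [he1 j (by omega)]; exact f3, f4, f5,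
          by rw [pv_getD_append_lt _ _ _ _ (by omega)]; exact f6,
          by rw [pv_getD_append_lt _ _ _ _ (by omega)]; exact f7⟩
    · -- k = i: the freshly appended entry
      have hki'' : k = i := by omega
      subst hki''
      rcases hcase with ⟨e1, e2, rfl⟩ | ⟨j, v, seg, w, hjk, f1, f2, f3, f4, f5, f6, rfl⟩
      · exact Or.inl ⟨e1, e2, by rw [← hb0len] at *; exact pv_getD_append_eq _ _ _⟩
      · refine Or.inr ⟨j, v, seg, w, hjk, f1, f2, by rw [he1 j (by omega)]; exact f3, f4, f5,
          by rw [pv_getD_append_lt _ _ _ _ (by omega)]; exact f6, ?_⟩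
        rw [← hb0len] at *
        exact pv_getD_append_eq _ _ _
  · intro k hik hkn
    refine ⟨by rw [he1 k (by omega)]; exact (hrel.2.2.2.2.2.2 k (by omega) hkn).1,
      by rw [he2 k (by omega)]; exact (hrel.2.2.2.2.2.2 k (by omega) hkn).2⟩

theorem pv_rel_init (p : List Char) (words : List String) :
    pvRel p words 0
      ((List.replicate (p.length + 1) none).set 0 (some 0), List.replicate (p.length + 1) (-1))
      [some ((0 : Int), ([] : List String))] := by
  have hset : (List.replicate (p.length + 1) (none : Option Int)).set 0 (some 0)
      = some 0 :: List.replicate p.length none := by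
    rw [List.replicate_succ]; rfl
  refine ⟨by simp [hset], by simp, rfl, by simp [hset], rfl, by omega, ?_⟩
  · intro k hk hkn
    constructor
    · rw [hset, List.getD_eq_getElem?_getD]
      rcases Nat.exists_eq_add_of_lt (by omega : 0 < k) with ⟨k', rfl⟩
      simp only [List.getElem?_cons_succ, List.getElem?_replicate]
      split <;> rfl
    · rw [List.getD_eq_getElem?_getD]
      simp only [List.getElem?_replicate]
      split <;> rfl

theorem pv_outer_loop (words : List String) (p : List Char) :
    ∀ m, m ≤ p.length →
    pvRel p words m
      ((List.range m).foldl (pvA_outer (pvA_dict words) p)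
        ((List.replicate (p.length + 1) none).set 0 (some 0), List.replicate (p.length + 1) (-1)))
      ((List.range m).foldl (pvB_outer (pvB_first words) (pvB_lens words) p)
        [some ((0 : Int), ([] : List String))]) := by
  intro m
  induction m with
  | zero => intro _; exact pv_rel_init p words
  | succ m ih =>
    intro hm
    rw [List.range_succ, List.foldl_append, List.foldl_append]
    simp only [List.foldl_cons, List.foldl_nil]
    have hprev := ih (by omega)
    exact pv_outer_step words p (m + 1) (by omega) hm _ _ hprev _ _
      (pv_inner_loop words p (m + 1) (by omega) hm _ _ hprev)

-- A's reconstruction walk returns exactly the segmentation B stored (reversed)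
theorem pv_rec (words : List String) (p : List Char) (m : Nat)
    (sa : List (Option Int) × List Int) (best : List (Option (Int × List String)))
    (hm : m ≤ p.length) (h : pvRel p words m sa best) :
    ∀ (fuel k : Nat) (cnt : Int) (seg : List String) (acc : List String), k ≤ fuel → k ≤ m →
      best.getD k none = some (cnt, seg) →
      pvA_rec (pvA_dict words) p sa.2 fuel (k : Int) acc = acc ++ seg.reverse := by
  intro fuel
  induction fuel with
  | zero =>
    intro k cnt seg acc hkf _ hbk
    have hk0 : k = 0 := by omega
    subst hk0
    rw [h.2.2.2.2.1] at hbk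
    cases hbk
    simp [pvA_rec]
  | succ fuel ih =>
    intro k cnt seg acc hkf hkm hbk
    rcases Nat.eq_zero_or_pos k with rfl | hk1
    · rw [h.2.2.2.2.1] at hbk
      cases hbk
      simp [pvA_rec]
    · rcases h.2.2.2.2.2.1 k hk1 hkm with ⟨_, _, e3⟩ | ⟨j, v, seg', w, hjk, f1, f2, f3, f4, f5, f6, f7⟩
      · rw [e3] at hbk; cases hbk
      · rw [f7] at hbk
        injection hbk with hbk'
        have hseg : seg = seg' ++ [w] := (congrArg Prod.snd hbk').symm
        subst hseg
        have h0k : (0 : Int) < (k : Int) := by exact_mod_cast hk1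
        rw [pvA_rec, if_pos h0k]
        have hpj : PySem.List.pyGetD sa.2 (k : Int) (-1) = (j : Int) := by
          rw [PySem.List.pyGetD_natCast]
          exact f1
        have hkeymem : PySem.List.slice p (some (j : Int)) (some (k : Int)) ∈ (pvA_dict words).keys :=
          (PySem.Dict.contains_iff_mem_keys _ _).mp f4
        have hlenslice :
            (PySem.List.slice p (some (j : Int)) (some (k : Int))).length = k - j :=
          pv_slice_len p j k (le_of_lt hjk) (by omega)
        have hcast : (k : Int) - ((k - j : Nat) : Int) = (j : Int) := by
          rw [Nat.cast_sub (le_of_lt hjk)]; ring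
        have hpred : ((j : Int) == (k : Int)
              - ((PySem.List.slice p (some (j : Int)) (some (k : Int))).length : Int)
            && (PySem.List.slice p (some (j : Int)) (some (k : Int))
              == PySem.List.slice p (some (j : Int)) (some (k : Int)))) = true := by
          rw [hlenslice, hcast]
          simp
        have hfind := pv_find_unique (pvA_dict words).keys
          (fun y => (j : Int) == (k : Int) - (y.length : Int)
            && (y == PySem.List.slice p (some (j : Int)) (some (k : Int))))
          (PySem.List.slice p (some (j : Int)) (some (k : Int))) hkeymem hpred
          (fun y _ hpy => by
            rw [Bool.and_eq_true] at hpy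
            exact eq_of_beq hpy.2)
        obtain ⟨t, hflt⟩ := List.head?_eq_some_iff.mp f5
        have hgetA : ((pvA_dict words).getD
            (PySem.List.slice p (some (j : Int)) (some (k : Int))) []).headD "" = w := by
          rw [pvA_dict_getD, hflt]; rfl
        simp only [hpj, hfind, hgetA]
        rw [ih j v seg' (acc ++ [w]) (by omega) (by omega) f6]
        simp

theorem pv_main (phone : String) (words : List String) :
    phone_to_words phone words = phone_to_words_alt phone words := by
  simp only [phone_to_words, phone_to_words_alt]
  have hrel := pv_outer_loop words phone.toList phone.toList.length (le_refl _)
  rcases pv_counts hrel phone.toList.length (le_refl _) with ⟨hdn, hbn⟩ | ⟨v, seg, hdv, hbv⟩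
  · rw [hdn, hbn]
    simp
  · rw [hdv, hbv]
    simp only [if_neg (by simp : ¬ (some v = (none : Option Int)))]
    rw [pv_rec words phone.toList phone.toList.length _ _ (le_refl _) hrel
      (phone.toList.length + 1) phone.toList.length v seg [] (by omega) (le_refl _) hbv]
    simp

-- ===== VERDICT (by name: the statement is the Claim_ definition above) =====
theorem phone_to_words_spec : Claim_equal_phone_to_words := by
  intro phone words _ _
  unfold Spec_phone_to_words
  exact pv_main phone words
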